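-- pv_equiv track=rewrite | github.com/Prathameshk2696/Exploration_of_Burning_Mazes | MazeExploration.py | getCountOfNeighborsOnFire
-- ===== SOURCE A (Python) =====
-- def getCountOfNeighborsOnFire(maze,dim):
--     d = {} # create empty dictionary
--     for r in range(dim): # iterate through every row
--         for c in range(dim): # iterate through every column
--             count = 0 # initialize count of burning neighbors to 0
--             if r-1>=0 and maze.get((r-1,c),0)==2: # if cell above is on fire
--                 count += 1 # increment count by 1
--             if r+1<dim and maze.get((r+1,c),0)==2: # if cell below is on fire
--                 count += 1 # increment count by 1
--             if c-1>=0 and maze.get((r,c-1),0)==2: # if cell to the left is on fire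
--                 count += 1 # increment count by 1
--             if c+1<dim and maze.get((r,c+1),0)==2: # if cell to the right is on fire
--                 count += 1 # increment count by 1
--             d[(r,c)] = count # set count of burning neighbors of position (r,c)
--     return d # return a dictionary of counts of burning neighbors of all cells
-- ===== SOURCE B (Python) =====
-- def getCountOfNeighborsOnFire(maze, dim):
--     d = {(r, c): 0 for r in range(dim) for c in range(dim)}
--     for (fr, fc), v in maze.items():
--         if v == 2 and 0 <= fr < dim and 0 <= fc < dim:
--             for dr, dc in ((-1, 0), (1, 0), (0, -1), (0, 1)):
--                 nr, nc = fr + dr, fc + dc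
--                 if 0 <= nr < dim and 0 <= nc < dim:
--                     d[(nr, nc)] += 1
--     return d
-- ===== Notes on version B (the rewrite author's own statement) =====
-- stated objective: alternative
-- what changed: B scatters: it initializes every grid cell to 0 and then, for each in-grid burning cell in the maze dict, increments its in-bound orthogonal neighbors, instead of A's per-cell gather that probes the dict four times for every cell.
import Mathlib
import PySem

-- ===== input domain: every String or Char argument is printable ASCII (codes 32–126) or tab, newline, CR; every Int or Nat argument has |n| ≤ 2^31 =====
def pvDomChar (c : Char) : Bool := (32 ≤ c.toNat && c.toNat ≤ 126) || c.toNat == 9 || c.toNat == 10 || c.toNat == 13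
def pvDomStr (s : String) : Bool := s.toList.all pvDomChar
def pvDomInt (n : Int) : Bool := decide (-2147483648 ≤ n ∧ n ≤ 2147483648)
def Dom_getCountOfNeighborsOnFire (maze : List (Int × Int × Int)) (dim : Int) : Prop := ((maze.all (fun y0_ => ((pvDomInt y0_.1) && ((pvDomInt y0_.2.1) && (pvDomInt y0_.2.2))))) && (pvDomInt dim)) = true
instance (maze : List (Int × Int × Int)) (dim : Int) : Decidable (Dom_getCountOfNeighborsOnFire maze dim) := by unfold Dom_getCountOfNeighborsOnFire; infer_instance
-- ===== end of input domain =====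

-- B scatters +1 from each in-grid burning cell to its in-bound neighbors over a zero-initialized
-- grid dict, instead of A's per-cell gather probing the maze dict four times per cell (objective: alternative).


-- the maze dict (keys (r, c), values) flattened to entry triples (r, c, v) by the type convention
def pvKV (e : Int × Int × Int) : (Int × Int) × Int := ((e.1, e.2.1), e.2.2)

def pvMazeDict (maze : List (Int × Int × Int)) : PySem.Dict (Int × Int) Int :=
  PySem.Dict.mk (maze.map pvKV)

-- ===== PORT A =====
def getCountOfNeighborsOnFire (maze : List (Int × Int × Int)) (dim : Int) : List (Int × Int × Int) :=
  let m := pvMazeDict maze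
  let d := (PySem.List.pyRange 0 dim 1).foldl (fun d r =>
      (PySem.List.pyRange 0 dim 1).foldl (fun d c =>
        let count : Int := 0
        let count := if 0 ≤ r - 1 ∧ m.getD (r - 1, c) 0 = 2 then count + 1 else count
        let count := if r + 1 < dim ∧ m.getD (r + 1, c) 0 = 2 then count + 1 else count
        let count := if 0 ≤ c - 1 ∧ m.getD (r, c - 1) 0 = 2 then count + 1 else count
        let count := if c + 1 < dim ∧ m.getD (r, c + 1) 0 = 2 then count + 1 else count
        d.insert (r, c) count) d)
    PySem.Dict.empty
  d.items.map (fun p => (p.1.1, p.1.2, p.2))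

-- ===== PORT B =====
def pvOffs : List (Int × Int) := [(-1, 0), (1, 0), (0, -1), (0, 1)]

def getCountOfNeighborsOnFire_alt (maze : List (Int × Int × Int)) (dim : Int) : List (Int × Int × Int) :=
  let d0 := (PySem.List.pyRange 0 dim 1).foldl (fun d r =>
      (PySem.List.pyRange 0 dim 1).foldl (fun d c => d.insert (r, c) (0 : Int)) d)
    PySem.Dict.empty
  let d := (pvMazeDict maze).items.foldl (fun d e =>
      if e.2 = 2 ∧ 0 ≤ e.1.1 ∧ e.1.1 < dim ∧ 0 ≤ e.1.2 ∧ e.1.2 < dim then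
        pvOffs.foldl (fun d o =>
          if 0 ≤ e.1.1 + o.1 ∧ e.1.1 + o.1 < dim ∧ 0 ≤ e.1.2 + o.2 ∧ e.1.2 + o.2 < dim then
            d.modify (e.1.1 + o.1, e.1.2 + o.2) 0 (· + 1)
          else d) d
      else d) d0
  d.items.map (fun p => (p.1.1, p.1.2, p.2))

-- ===== PRECONDITION & SPEC =====
-- Pre_ excludes association lists with duplicate (r, c) keys: those do not encode any Python dict
-- (a dict literal collapses them), so no behaviour of Python A is defined on them.
def Pre_getCountOfNeighborsOnFire (maze : List (Int × Int × Int)) (dim : Int) : Prop :=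
  (maze.map (fun e => (e.1, e.2.1))).Nodup

instance (maze : List (Int × Int × Int)) (dim : Int) : Decidable (Pre_getCountOfNeighborsOnFire maze dim) := by
  unfold Pre_getCountOfNeighborsOnFire; infer_instance

def pvWitness_getCountOfNeighborsOnFire : (List (Int × Int × Int)) × Int := ([(0, 0, 2), (1, 1, 1)], 2)

def Spec_getCountOfNeighborsOnFire (maze : List (Int × Int × Int)) (dim : Int) (out : List (Int × Int × Int)) : Prop := out = getCountOfNeighborsOnFire_alt maze dim
instance (maze : List (Int × Int × Int)) (dim : Int) (out : List (Int × Int × Int)) : Decidable (Spec_getCountOfNeighborsOnFire maze dim out) := by unfold Spec_getCountOfNeighborsOnFire; infer_instance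

-- ===== CLAIM (what is proved, stated in full; the proofs are below) =====
def Claim_equal_getCountOfNeighborsOnFire : Prop := ∀ (maze : List (Int × Int × Int)) (dim : Int), Dom_getCountOfNeighborsOnFire maze dim → Pre_getCountOfNeighborsOnFire maze dim → Spec_getCountOfNeighborsOnFire maze dim (getCountOfNeighborsOnFire maze dim)

-- ===== LEMMAS AND PROOFS =====

-- row-major list of all grid cells
def pvCells (dim : Int) : List (Int × Int) :=
  (PySem.List.pyRange 0 dim 1) ×ˢ (PySem.List.pyRange 0 dim 1)

-- A's gather count at a cell
def pvCountA (m : PySem.Dict (Int × Int) Int) (dim : Int) (p : Int × Int) : Int :=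
  (if 0 ≤ p.1 - 1 ∧ m.getD (p.1 - 1, p.2) 0 = 2 then 1 else 0)
  + (if p.1 + 1 < dim ∧ m.getD (p.1 + 1, p.2) 0 = 2 then 1 else 0)
  + (if 0 ≤ p.2 - 1 ∧ m.getD (p.1, p.2 - 1) 0 = 2 then 1 else 0)
  + (if p.2 + 1 < dim ∧ m.getD (p.1, p.2 + 1) 0 = 2 then 1 else 0)

-- B's scatter step (the lambda of the alt port's fold)
def pvStep (dim : Int) (d : PySem.Dict (Int × Int) Int) (e : (Int × Int) × Int) : PySem.Dict (Int × Int) Int :=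
  if e.2 = 2 ∧ 0 ≤ e.1.1 ∧ e.1.1 < dim ∧ 0 ≤ e.1.2 ∧ e.1.2 < dim then
    pvOffs.foldl (fun d o =>
      if 0 ≤ e.1.1 + o.1 ∧ e.1.1 + o.1 < dim ∧ 0 ≤ e.1.2 + o.2 ∧ e.1.2 + o.2 < dim then
        d.modify (e.1.1 + o.1, e.1.2 + o.2) 0 (· + 1)
      else d) d
  else d

-- contribution of entry e, via offset o, to cell q
def pvInd (dim : Int) (q : Int × Int) (e : (Int × Int) × Int) (o : Int × Int) : Int :=
  if e.2 = 2 ∧ (0 ≤ e.1.1 ∧ e.1.1 < dim ∧ 0 ≤ e.1.2 ∧ e.1.2 < dim)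
      ∧ (e.1.1 + o.1, e.1.2 + o.2) = q
      ∧ (0 ≤ e.1.1 + o.1 ∧ e.1.1 + o.1 < dim ∧ 0 ≤ e.1.2 + o.2 ∧ e.1.2 + o.2 < dim) then 1 else 0

def pvContrib (dim : Int) (q : Int × Int) (e : (Int × Int) × Int) : Int :=
  pvInd dim q e (-1, 0) + pvInd dim q e (1, 0) + pvInd dim q e (0, -1) + pvInd dim q e (0, 1)

theorem pv_mem_cells (dim : Int) (p : Int × Int) :
    p ∈ pvCells dim ↔ 0 ≤ p.1 ∧ p.1 < dim ∧ 0 ≤ p.2 ∧ p.2 < dim := by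
  obtain ⟨a, b⟩ := p
  rw [pvCells, List.mem_product, PySem.List.mem_pyRange_one, PySem.List.mem_pyRange_one]
  tauto

theorem pv_cells_nodup (dim : Int) : (pvCells dim).Nodup :=
  List.Nodup.product (PySem.List.nodup_pyRange_one 0 dim) (PySem.List.nodup_pyRange_one 0 dim)

theorem pv_gridItems (rs cs : List Int) (V : Int → Int → Int) (d : PySem.Dict (Int × Int) Int)
    (hrs : rs.Nodup) (hcs : cs.Nodup)
    (hfresh : ∀ r ∈ rs, ∀ c, d.contains (r, c) = false) :
    (rs.foldl (fun d r => cs.foldl (fun d c => d.insert (r, c) (V r c)) d) d).items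
      = d.items ++ rs.flatMap (fun r => cs.map (fun c => ((r, c), V r c))) := by
  induction rs generalizing d with
  | nil => simp
  | cons r rest ih =>
    rw [List.nodup_cons] at hrs
    obtain ⟨hr, hrest⟩ := hrs
    rw [List.foldl_cons]
    have hinner : (cs.foldl (fun d c => d.insert (r, c) (V r c)) d).items
        = d.items ++ cs.map (fun c => ((r, c), V r c)) := by
      apply PySem.Dict.items_foldl_insert_fresh cs (fun c => (r, c)) (V r) d
      · intro c hc; exact hfresh r (by simp) c
      · exact hcs.map (fun a b h => by cases h; rfl)
    have hkeys : (cs.foldl (fun d c => d.insert (r, c) (V r c)) d).keys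
        = d.keys ++ cs.map (fun c => (r, c)) := by
      show ((cs.foldl (fun d c => d.insert (r, c) (V r c)) d).items.map (·.1)) = _
      rw [hinner, List.map_append, List.map_map]
      rfl
    have hfresh' : ∀ r' ∈ rest, ∀ c, (cs.foldl (fun d c => d.insert (r, c) (V r c)) d).contains (r', c) = false := by
      intro r' hr' c
      rw [PySem.Dict.contains_eq_decide_mem_keys, hkeys, decide_eq_false_iff_not]
      simp only [List.mem_append, List.mem_map, not_or]
      constructor
      · intro hmem
        have := hfresh r' (by simp [hr']) c
        rw [PySem.Dict.contains_eq_decide_mem_keys, decide_eq_false_iff_not] at this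
        exact this hmem
      · rintro ⟨c', -, hc'⟩
        have : r = r' := congrArg Prod.fst hc'
        exact hr (this ▸ hr')
    rw [ih _ hrest hfresh', hinner]
    simp [List.append_assoc]

theorem pv_modify_keys (d : PySem.Dict (Int × Int) Int) (k : Int × Int) (hk : k ∈ d.keys) :
    (d.modify k 0 (· + 1)).keys = d.keys := by
  rw [PySem.Dict.keys_modify, PySem.Dict.keys_insert_of_contains]
  exact (PySem.Dict.contains_iff_mem_keys d k).mpr hk

theorem pv_step_keys (dim : Int) (d : PySem.Dict (Int × Int) Int) (e : (Int × Int) × Int)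
    (hgrid : ∀ p : Int × Int, 0 ≤ p.1 → p.1 < dim → 0 ≤ p.2 → p.2 < dim → p ∈ d.keys) :
    (pvStep dim d e).keys = d.keys := by
  rw [pvStep]
  split_ifs with hg
  · simp only [pvOffs, List.foldl_cons, List.foldl_nil]
    have step : ∀ (d' : PySem.Dict (Int × Int) Int) (o1 o2 : Int), d'.keys = d.keys →
        (if 0 ≤ e.1.1 + o1 ∧ e.1.1 + o1 < dim ∧ 0 ≤ e.1.2 + o2 ∧ e.1.2 + o2 < dim then
            d'.modify (e.1.1 + o1, e.1.2 + o2) 0 (· + 1) else d').keys = d.keys := by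
      intro d' o1 o2 hd'
      split_ifs with hb
      · rw [pv_modify_keys, hd']
        rw [hd']
        exact hgrid _ hb.1 hb.2.1 hb.2.2.1 hb.2.2.2
      · exact hd'
    exact step _ 0 1 (step _ 0 (-1) (step _ 1 0 (step _ (-1) 0 rfl)))
  · rfl

theorem pv_scatter_keys (dim : Int) (l : List ((Int × Int) × Int)) (d : PySem.Dict (Int × Int) Int)
    (hgrid : ∀ p : Int × Int, 0 ≤ p.1 → p.1 < dim → 0 ≤ p.2 → p.2 < dim → p ∈ d.keys) :
    (l.foldl (pvStep dim) d).keys = d.keys := by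
  induction l generalizing d with
  | nil => rfl
  | cons e t ih =>
    rw [List.foldl_cons]
    have hk := pv_step_keys dim d e hgrid
    rw [ih (pvStep dim d e) (by rw [hk]; exact hgrid), hk]

theorem pv_step_getD (dim : Int) (d : PySem.Dict (Int × Int) Int) (e : (Int × Int) × Int) (q : Int × Int) :
    (pvStep dim d e).getD q 0 = d.getD q 0 + pvContrib dim q e := by
  rw [pvStep, pvContrib]
  split_ifs with hg
  · simp only [pvOffs, List.foldl_cons, List.foldl_nil]
    have step : ∀ (d' : PySem.Dict (Int × Int) Int) (o1 o2 : Int),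
        (if 0 ≤ e.1.1 + o1 ∧ e.1.1 + o1 < dim ∧ 0 ≤ e.1.2 + o2 ∧ e.1.2 + o2 < dim then
            d'.modify (e.1.1 + o1, e.1.2 + o2) 0 (· + 1) else d').getD q 0
          = d'.getD q 0 + pvInd dim q e (o1, o2) := by
      intro d' o1 o2
      rw [pvInd]
      split_ifs with hb hi hi
      · rw [PySem.Dict.getD_modify]
        rcases hi with ⟨-, -, hk, -⟩
        rw [if_pos hk.symm, hk]
      · rw [PySem.Dict.getD_modify, if_neg, add_zero]
        intro hqk
        exact hi ⟨hg.1, hg.2, hqk.symm, hb⟩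
      · exact absurd hi.2.2.2 hb
      · rw [add_zero]
    rw [step, step, step, step]
    ring
  · have z : ∀ o : Int × Int, pvInd dim q e o = 0 := by
      intro o; rw [pvInd, if_neg]; rintro ⟨h1, h2, -, -⟩; exact hg ⟨h1, h2.1, h2.2.1, h2.2.2.1, h2.2.2.2⟩
    rw [z, z, z, z]; ring

theorem pv_scatter_getD (dim : Int) (l : List ((Int × Int) × Int)) (d : PySem.Dict (Int × Int) Int) (q : Int × Int) :
    (l.foldl (pvStep dim) d).getD q 0 = d.getD q 0 + (l.map (pvContrib dim q)).sum := by
  induction l generalizing d with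
  | nil => simp
  | cons e t ih =>
    rw [List.foldl_cons, List.map_cons, List.sum_cons, ih, pv_step_getD]
    ring

theorem pv_sum_ind_zero (dim : Int) (q o : Int × Int) (l : List ((Int × Int) × Int))
    (h : ∀ e ∈ l, e.1 ≠ (q.1 - o.1, q.2 - o.2)) :
    (l.map (fun e => pvInd dim q e o)).sum = 0 := by
  induction l with
  | nil => simp
  | cons e t ih =>
    have he := h e (by simp)
    have ht := ih (fun x hx => h x (by simp [hx]))
    rw [List.map_cons, List.sum_cons, ht, add_zero, pvInd, if_neg]
    rintro ⟨-, -, hk, -⟩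
    apply he
    obtain ⟨⟨a, b⟩, v⟩ := e
    obtain ⟨qa, qb⟩ := q
    simp only [Prod.mk.injEq] at hk ⊢
    omega

theorem pv_one_off (dim : Int) (q o : Int × Int) (l : List ((Int × Int) × Int))
    (hnd : (l.map (·.1)).Nodup) (hq : 0 ≤ q.1 ∧ q.1 < dim ∧ 0 ≤ q.2 ∧ q.2 < dim) :
    (l.map (fun e => pvInd dim q e o)).sum
      = if (0 ≤ q.1 - o.1 ∧ q.1 - o.1 < dim ∧ 0 ≤ q.2 - o.2 ∧ q.2 - o.2 < dim)
            ∧ (PySem.Dict.mk l).getD (q.1 - o.1, q.2 - o.2) 0 = 2 then 1 else 0 := by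
  induction l with
  | nil =>
    have hempty : (PySem.Dict.mk ([] : List ((Int × Int) × Int))).getD (q.1 - o.1, q.2 - o.2) 0 = 0 := rfl
    simp [hempty]
  | cons e t ih =>
    simp only [List.map_cons, List.nodup_cons, List.mem_map] at hnd
    obtain ⟨hne, hndt⟩ := hnd
    by_cases hk : e.1 = (q.1 - o.1, q.2 - o.2)
    · have ht0 : (t.map (fun e => pvInd dim q e o)).sum = 0 := by
        apply pv_sum_ind_zero
        intro x hx hx1
        exact hne ⟨x, hx, by rw [hx1, ← hk]⟩
      have hget : (PySem.Dict.mk (e :: t)).getD (q.1 - o.1, q.2 - o.2) 0 = e.2 := by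
        rw [PySem.Dict.getD_eq_get?_getD]
        rw [show (e :: t) = ((e.1, e.2) :: t) by simp]
        rw [PySem.Dict.get?_mk_cons]
        simp [hk]
      rw [List.map_cons, List.sum_cons, ht0, add_zero, hget, pvInd]
      obtain ⟨⟨a, b⟩, v⟩ := e
      obtain ⟨qa, qb⟩ := q
      simp only [Prod.mk.injEq] at hk ⊢
      obtain ⟨hk1, hk2⟩ := hk
      subst hk1; subst hk2
      obtain ⟨h1, h2, h3, h4⟩ := hq
      split_ifs with hL hR <;> first | rfl | (exfalso; revert hL hR; tauto) | (exfalso; omega)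
    · have hget : (PySem.Dict.mk (e :: t)).getD (q.1 - o.1, q.2 - o.2) 0
          = (PySem.Dict.mk t).getD (q.1 - o.1, q.2 - o.2) 0 := by
        rw [PySem.Dict.getD_eq_get?_getD, PySem.Dict.getD_eq_get?_getD]
        rw [show (e :: t) = ((e.1, e.2) :: t) by simp]
        rw [PySem.Dict.get?_mk_cons]
        simp [hk]
      have hhead : pvInd dim q e o = 0 := by
        rw [pvInd, if_neg]
        rintro ⟨-, -, hk2, -⟩
        apply hk
        obtain ⟨⟨a, b⟩, v⟩ := e
        obtain ⟨qa, qb⟩ := q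
        simp only [Prod.mk.injEq] at hk2 ⊢
        omega
      rw [List.map_cons, List.sum_cons, hhead, zero_add, hget, ih hndt]

theorem pv_cnt_eq_countA (dim : Int) (q : Int × Int) (maze : List (Int × Int × Int))
    (hpre : Pre_getCountOfNeighborsOnFire maze dim)
    (hq : 0 ≤ q.1 ∧ q.1 < dim ∧ 0 ≤ q.2 ∧ q.2 < dim) :
    ((maze.map pvKV).map (pvContrib dim q)).sum = pvCountA (pvMazeDict maze) dim q := by
  have hnd : ((maze.map pvKV).map (·.1)).Nodup := by
    rw [List.map_map]
    exact hpre
  have hsplit : ((maze.map pvKV).map (pvContrib dim q)).sum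
      = ((maze.map pvKV).map (fun e => pvInd dim q e (-1, 0))).sum
        + ((maze.map pvKV).map (fun e => pvInd dim q e (1, 0))).sum
        + ((maze.map pvKV).map (fun e => pvInd dim q e (0, -1))).sum
        + ((maze.map pvKV).map (fun e => pvInd dim q e (0, 1))).sum := by
    induction (maze.map pvKV) with
    | nil => simp
    | cons e t ih => simp only [List.map_cons, List.sum_cons, ih, pvContrib]; ring
  obtain ⟨h1, h2, h3, h4⟩ := hq
  rw [hsplit,
    pv_one_off dim q (-1, 0) _ hnd ⟨h1, h2, h3, h4⟩,
    pv_one_off dim q (1, 0) _ hnd ⟨h1, h2, h3, h4⟩,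
    pv_one_off dim q (0, -1) _ hnd ⟨h1, h2, h3, h4⟩,
    pv_one_off dim q (0, 1) _ hnd ⟨h1, h2, h3, h4⟩,
    pvCountA]
  have e1 : ((q.1 - (-1 : Int), q.2 - (0 : Int)) : Int × Int) = (q.1 + 1, q.2) := by
    rw [Prod.mk.injEq]; constructor <;> ring
  have e2 : ((q.1 - (1 : Int), q.2 - (0 : Int)) : Int × Int) = (q.1 - 1, q.2) := by
    rw [Prod.mk.injEq]; constructor <;> ring
  have e3 : ((q.1 - (0 : Int), q.2 - (-1 : Int)) : Int × Int) = (q.1, q.2 + 1) := by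
    rw [Prod.mk.injEq]; constructor <;> ring
  have e4 : ((q.1 - (0 : Int), q.2 - (1 : Int)) : Int × Int) = (q.1, q.2 - 1) := by
    rw [Prod.mk.injEq]; constructor <;> ring
  have hm : pvMazeDict maze = PySem.Dict.mk (maze.map pvKV) := rfl
  simp only [hm, e1, e2, e3, e4]
  have c1 : ((0 ≤ q.1 - (-1 : Int) ∧ q.1 - (-1 : Int) < dim ∧ 0 ≤ q.2 - (0 : Int) ∧ q.2 - (0 : Int) < dim)
      ∧ (PySem.Dict.mk (maze.map pvKV)).getD (q.1 + 1, q.2) 0 = 2)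
      ↔ (q.1 + 1 < dim ∧ (PySem.Dict.mk (maze.map pvKV)).getD (q.1 + 1, q.2) 0 = 2) := by
    constructor
    · rintro ⟨hb, hg⟩; exact ⟨by omega, hg⟩
    · rintro ⟨hb, hg⟩; exact ⟨by omega, hg⟩
  have c2 : ((0 ≤ q.1 - (1 : Int) ∧ q.1 - (1 : Int) < dim ∧ 0 ≤ q.2 - (0 : Int) ∧ q.2 - (0 : Int) < dim)
      ∧ (PySem.Dict.mk (maze.map pvKV)).getD (q.1 - 1, q.2) 0 = 2)
      ↔ (0 ≤ q.1 - 1 ∧ (PySem.Dict.mk (maze.map pvKV)).getD (q.1 - 1, q.2) 0 = 2) := by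
    constructor
    · rintro ⟨hb, hg⟩; exact ⟨by omega, hg⟩
    · rintro ⟨hb, hg⟩; exact ⟨by omega, hg⟩
  have c3 : ((0 ≤ q.1 - (0 : Int) ∧ q.1 - (0 : Int) < dim ∧ 0 ≤ q.2 - (-1 : Int) ∧ q.2 - (-1 : Int) < dim)
      ∧ (PySem.Dict.mk (maze.map pvKV)).getD (q.1, q.2 + 1) 0 = 2)
      ↔ (q.2 + 1 < dim ∧ (PySem.Dict.mk (maze.map pvKV)).getD (q.1, q.2 + 1) 0 = 2) := by
    constructor
    · rintro ⟨hb, hg⟩; exact ⟨by omega, hg⟩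
    · rintro ⟨hb, hg⟩; exact ⟨by omega, hg⟩
  have c4 : ((0 ≤ q.1 - (0 : Int) ∧ q.1 - (0 : Int) < dim ∧ 0 ≤ q.2 - (1 : Int) ∧ q.2 - (1 : Int) < dim)
      ∧ (PySem.Dict.mk (maze.map pvKV)).getD (q.1, q.2 - 1) 0 = 2)
      ↔ (0 ≤ q.2 - 1 ∧ (PySem.Dict.mk (maze.map pvKV)).getD (q.1, q.2 - 1) 0 = 2) := by
    constructor
    · rintro ⟨hb, hg⟩; exact ⟨by omega, hg⟩
    · rintro ⟨hb, hg⟩; exact ⟨by omega, hg⟩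
  rw [if_congr c1 rfl rfl, if_congr c2 rfl rfl, if_congr c3 rfl rfl, if_congr c4 rfl rfl]
  ring

-- A's per-cell let-chain equals pvCountA
theorem pv_letchain (m : PySem.Dict (Int × Int) Int) (dim r c : Int) :
    (let count : Int := 0
     let count := if 0 ≤ r - 1 ∧ m.getD (r - 1, c) 0 = 2 then count + 1 else count
     let count := if r + 1 < dim ∧ m.getD (r + 1, c) 0 = 2 then count + 1 else count
     let count := if 0 ≤ c - 1 ∧ m.getD (r, c - 1) 0 = 2 then count + 1 else count
     let count := if c + 1 < dim ∧ m.getD (r, c + 1) 0 = 2 then count + 1 else count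
     count) = pvCountA m dim (r, c) := by
  rw [pvCountA]
  split_ifs <;> norm_num

-- the two ports agree on Pre_
theorem pv_main (maze : List (Int × Int × Int)) (dim : Int)
    (hpre : Pre_getCountOfNeighborsOnFire maze dim) :
    getCountOfNeighborsOnFire maze dim = getCountOfNeighborsOnFire_alt maze dim := by
  have hempty_items : (PySem.Dict.empty : PySem.Dict (Int × Int) Int).items = [] := rfl
  have hfreshE : ∀ r ∈ PySem.List.pyRange 0 dim 1, ∀ c : Int,
      (PySem.Dict.empty : PySem.Dict (Int × Int) Int).contains (r, c) = false := by
    intro r hr c; exact PySem.Dict.contains_empty _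
  have hnodupR := PySem.List.nodup_pyRange_one 0 dim
  have hflat : ∀ V : Int → Int → Int,
      (PySem.List.pyRange 0 dim 1).flatMap
          (fun r => (PySem.List.pyRange 0 dim 1).map (fun c => ((r, c), V r c)))
        = (pvCells dim).map (fun p => (p, V p.1 p.2)) := by
    intro V
    rw [pvCells]
    show _ = (List.product _ _).map _
    rw [List.product, List.map_flatMap]
    congr 1
    funext r
    rw [List.map_map]
    rfl
  -- A reduces to a map over the cells
  have hA : getCountOfNeighborsOnFire maze dim
      = (pvCells dim).map (fun p => (p.1, p.2, pvCountA (pvMazeDict maze) dim p)) := by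
    show (((PySem.List.pyRange 0 dim 1).foldl (fun d r =>
        (PySem.List.pyRange 0 dim 1).foldl (fun d c =>
          d.insert (r, c)
            (let count : Int := 0
             let count := if 0 ≤ r - 1 ∧ (pvMazeDict maze).getD (r - 1, c) 0 = 2 then count + 1 else count
             let count := if r + 1 < dim ∧ (pvMazeDict maze).getD (r + 1, c) 0 = 2 then count + 1 else count
             let count := if 0 ≤ c - 1 ∧ (pvMazeDict maze).getD (r, c - 1) 0 = 2 then count + 1 else count
             let count := if c + 1 < dim ∧ (pvMazeDict maze).getD (r, c + 1) 0 = 2 then count + 1 else count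
             count)) d) PySem.Dict.empty).items.map (fun p => (p.1.1, p.1.2, p.2))) = _
    rw [pv_gridItems _ _ _ _ hnodupR hnodupR hfreshE, hempty_items, List.nil_append, hflat,
      List.map_map]
    apply List.map_congr_left
    intro p hp
    obtain ⟨a, b⟩ := p
    show (a, b,
        (let count : Int := 0
         let count := if 0 ≤ a - 1 ∧ (pvMazeDict maze).getD (a - 1, b) 0 = 2 then count + 1 else count
         let count := if a + 1 < dim ∧ (pvMazeDict maze).getD (a + 1, b) 0 = 2 then count + 1 else count
         let count := if 0 ≤ b - 1 ∧ (pvMazeDict maze).getD (a, b - 1) 0 = 2 then count + 1 else count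
         let count := if b + 1 < dim ∧ (pvMazeDict maze).getD (a, b + 1) 0 = 2 then count + 1 else count
         count)) = (a, b, pvCountA (pvMazeDict maze) dim (a, b))
    rw [pv_letchain]
  -- B's initial dict
  have hd0 : ((PySem.List.pyRange 0 dim 1).foldl (fun d r =>
        (PySem.List.pyRange 0 dim 1).foldl (fun d c => d.insert (r, c) (0 : Int)) d)
      PySem.Dict.empty).items = (pvCells dim).map (fun p => (p, (0 : Int))) := by
    rw [pv_gridItems _ _ (fun _ _ => 0) _ hnodupR hnodupR hfreshE, hempty_items, List.nil_append,
      hflat]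
  set d0 := ((PySem.List.pyRange 0 dim 1).foldl (fun d r =>
        (PySem.List.pyRange 0 dim 1).foldl (fun d c => d.insert (r, c) (0 : Int)) d)
      PySem.Dict.empty) with hd0def
  have hd0keys : d0.keys = pvCells dim := by
    show d0.items.map (·.1) = _
    rw [hd0]
    rw [List.map_map]
    exact List.map_id _
  have hgrid0 : ∀ p : Int × Int, 0 ≤ p.1 → p.1 < dim → 0 ≤ p.2 → p.2 < dim → p ∈ d0.keys := by
    intro p h1 h2 h3 h4
    rw [hd0keys]
    exact (pv_mem_cells dim p).mpr ⟨h1, h2, h3, h4⟩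
  set df := (maze.map pvKV).foldl (pvStep dim) d0 with hdfdef
  have hB : getCountOfNeighborsOnFire_alt maze dim = df.items.map (fun p => (p.1.1, p.1.2, p.2)) := rfl
  have hdfkeys : df.keys = pvCells dim := by
    rw [hdfdef, pv_scatter_keys dim _ d0 hgrid0, hd0keys]
  have hdfnodup : df.keys.Nodup := by
    rw [hdfkeys]; exact pv_cells_nodup dim
  have hdfitems : df.items = (pvCells dim).map (fun k => (k, df.getD k 0)) := by
    rw [PySem.Dict.items_eq_map_keys df hdfnodup 0, hdfkeys]
  rw [hA, hB, hdfitems, List.map_map]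
  apply List.map_congr_left
  intro p hp
  obtain ⟨hq1, hq2, hq3, hq4⟩ := (pv_mem_cells dim p).mp hp
  show (p.1, p.2, pvCountA (pvMazeDict maze) dim p)
      = (p.1, p.2, ((maze.map pvKV).foldl (pvStep dim) d0).getD p 0)
  have hz : d0.getD p 0 = 0 := by
    apply PySem.Dict.getD_of_mem_items
    · rw [hd0]
      exact List.mem_map_of_mem hp
    · rw [hd0keys]; exact pv_cells_nodup dim
  rw [pv_scatter_getD, hz, zero_add,
    pv_cnt_eq_countA dim p maze hpre ⟨hq1, hq2, hq3, hq4⟩]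

-- ===== VERDICT (by name: the statement is the Claim_ definition above) =====
theorem getCountOfNeighborsOnFire_spec : Claim_equal_getCountOfNeighborsOnFire := by
  intro maze dim hdom hpre
  unfold Spec_getCountOfNeighborsOnFire
  exact pv_main maze dim hpre
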